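-- pv_equiv track=rewrite | github.com/T1r3sh/some_training_problems | correct_Parentheses.py | new_search_char
-- ===== SOURCE A (Python) =====
-- def new_search_char(s: str, char: str) -> list[int]:
--     """New version of search algo.
--
--     Args:
--         s (str): input string
--         char (str): string to search in s string
--
--     Returns:
--         list[int]: all first indices of each char sequence in s string
--     """
--     idx = [i for i, x in enumerate(s) if x == char]
--     out = []
--     for i in idx:
--         out.append(i)
--         if len(out) > 1 and out[-1]-out[-2] == 1:
--             out.pop(-1)
--     return out
-- ===== SOURCE B (Python) =====
-- def new_search_char(s: str, char: str) -> list[int]: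
--     """Single pass: report a matching index unless it is adjacent to the
--     previously reported one (no intermediate index list, no append/pop)."""
--     out = []
--     last = None
--     for i, x in enumerate(s):
--         if x == char and (last is None or i - last >= 2):
--             out.append(i)
--             last = i
--     return out
-- ===== Notes on version B (the rewrite author's own statement) =====
-- stated objective: simpler
-- what changed: B replaces A's collect-all-matching-indices list plus append-then-maybe-pop filtering loop by one enumerate pass that tracks the last reported index and appends a match only when it is not adjacent to it.
import Mathlib
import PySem

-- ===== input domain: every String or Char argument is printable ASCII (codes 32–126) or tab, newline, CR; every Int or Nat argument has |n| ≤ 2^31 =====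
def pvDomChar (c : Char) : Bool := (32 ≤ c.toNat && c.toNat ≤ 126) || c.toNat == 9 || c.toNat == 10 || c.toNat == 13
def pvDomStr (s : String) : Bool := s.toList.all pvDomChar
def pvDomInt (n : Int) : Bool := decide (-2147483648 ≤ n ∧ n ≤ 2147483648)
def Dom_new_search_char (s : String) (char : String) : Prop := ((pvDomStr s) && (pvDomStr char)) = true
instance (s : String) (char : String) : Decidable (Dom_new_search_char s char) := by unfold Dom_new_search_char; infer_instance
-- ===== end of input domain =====

-- B replaces A's collect-then-filter (index list + append/pop loop) by a single
-- enumerate pass tracking the last reported index; same O(n) cost, simpler.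

-- x == char for a character x of s (shared by both ports; Python compares the
-- 1-character string to char)
def pvHit (char : String) (p : Int × Char) : Bool := String.ofList [p.2] == char

-- ===== PORT A =====
-- body of A's for-loop: append i, then pop it again if adjacent to the previous
-- kept index.  out.pop(-1) on the nonempty list is exactly dropLast; out[-1]/out[-2]
-- are exact via pyGetD since the length guard ensures the indices are in range.
def pvStepA (out : List Int) (i : Int) : List Int :=
  let out2 := out ++ [i]
  if out2.length > 1 ∧ PySem.List.pyGetD out2 (-1) 0 - PySem.List.pyGetD out2 (-2) 0 = 1 then
    out2.dropLast
  else out2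

def new_search_char (s : String) (char : String) : List Int :=
  let idx : List Int := ((PySem.List.enumerate s.toList).filter (pvHit char)).map (·.1)
  idx.foldl pvStepA []

-- ===== PORT B =====
-- body of B's if (after the x == char test): append unless adjacent to last
def pvStepB (st : List Int × Option Int) (p : Int × Char) : List Int × Option Int :=
  match st.2 with
  | none => (st.1 ++ [p.1], some p.1)
  | some last => if p.1 - last ≥ 2 then (st.1 ++ [p.1], some p.1) else st

def new_search_char_alt (s : String) (char : String) : List Int :=
  ((PySem.List.enumerate s.toList).foldl
    (fun st p => if pvHit char p then pvStepB st p else st) (([] : List Int), (none : Option Int))).1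

-- ===== PRECONDITION & SPEC =====
def Spec_new_search_char (s : String) (char : String) (out : List Int) : Prop := out = new_search_char_alt s char
instance (s : String) (char : String) (out : List Int) : Decidable (Spec_new_search_char s char out) := by unfold Spec_new_search_char; infer_instance

-- ===== CLAIM (what is proved, stated in full; the proofs are below) =====
def Claim_equal_new_search_char : Prop := ∀ (s : String) (char : String), Dom_new_search_char s char → Spec_new_search_char s char (new_search_char s char)

-- ===== LEMMAS AND PROOFS =====

-- a guarded fold is a fold over the filtered list
theorem pv_foldl_guard {α σ : Type} (c : α → Bool) (g : σ → α → σ) :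
    ∀ (l : List α) (st : σ),
      l.foldl (fun st x => if c x then g st x else st) st = (l.filter c).foldl g st := by
  intro l
  induction l with
  | nil => intro st; rfl
  | cons x xs ih =>
    intro st
    by_cases h : c x
    · simp [List.foldl, List.filter, h, ih]
    · simp [List.foldl, List.filter, h, ih]

theorem pv_pyGetD_neg_two (l : List Int) (a b d : Int) :
    PySem.List.pyGetD ((l ++ [a]) ++ [b]) (-2) d = a := by
  rw [PySem.List.pyGetD_neg_ofNat ((l ++ [a]) ++ [b]) 2 d (by omega) (by simp)]
  have h : ((l ++ [a]) ++ [b]).length - 2 = l.length := by simp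
  simp

-- A's step on a nonempty accumulator with last element a
theorem pv_stepA_concat (o : List Int) (a i : Int) :
    pvStepA (o ++ [a]) i = if i - a = 1 then o ++ [a] else o ++ [a] ++ [i] := by
  unfold pvStepA
  dsimp only []
  rw [PySem.List.pyGetD_neg_one_append_singleton, pv_pyGetD_neg_two]
  by_cases h : i - a = 1
  · have hc : ((o ++ [a]) ++ [i]).length > 1 ∧ i - a = 1 := by simp [h]
    rw [if_pos hc, if_pos h, List.dropLast_concat]
  · have hc : ¬ (((o ++ [a]) ++ [i]).length > 1 ∧ i - a = 1) := by simp [h]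
    rw [if_neg hc, if_neg h]

theorem pv_stepA_nil (i : Int) : pvStepA [] i = [i] := by
  unfold pvStepA; simp

-- core invariant: A's fold over the indices equals the first component of B's
-- fold over the pairs, provided the indices are strictly increasing and exceed
-- everything already in the accumulator, whose last element B caches.
theorem pv_core :
    ∀ (lp : List (Int × Char)) (out : List Int),
      (∀ p ∈ lp, ∀ j ∈ out, j < p.1) →
      lp.Pairwise (fun p q => p.1 < q.1) →
      lp.foldl (fun o p => pvStepA o p.1) out = (lp.foldl pvStepB (out, out.getLast?)).1 := by
  intro lp
  induction lp with
  | nil => intro out _ _; rfl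
  | cons p ps ih =>
    intro out hlt hpw
    have hpw' := (List.pairwise_cons.mp hpw).2
    have hhd := (List.pairwise_cons.mp hpw).1
    simp only [List.foldl]
    rcases hout : out.getLast? with _ | a
    · -- out = []
      have hnil : out = [] := List.getLast?_eq_none_iff.mp hout
      subst hnil
      rw [pv_stepA_nil]
      have hB : pvStepB (([] : List Int), (none : Option Int)) p = ([p.1], some p.1) := rfl
      rw [hB]
      have := ih [p.1] (by
        intro q hq j hj
        simp at hj; subst hj
        exact hhd q hq) hpw'
      simpa using this
    · -- out = o ++ [a]
      obtain ⟨o, rfl⟩ : ∃ o, out = o ++ [a] := by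
        rcases List.eq_nil_or_concat out with h | ⟨o, b, rfl⟩
        · simp [h] at hout
        · simp at hout; exact ⟨o, by rw [hout, List.concat_eq_append]⟩
      have ha_mem : a ∈ o ++ [a] := by simp
      have hai : a < p.1 := hlt p (by simp) a ha_mem
      rw [pv_stepA_concat]
      have hB : pvStepB (o ++ [a], some a) p =
          if p.1 - a ≥ 2 then (o ++ [a] ++ [p.1], some p.1) else (o ++ [a], some a) := rfl
      rw [hB]
      by_cases h1 : p.1 - a = 1
      · have h2 : ¬ p.1 - a ≥ 2 := by omega
        rw [if_pos h1, if_neg h2]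
        rw [ih (o ++ [a]) (by intro q hq j hj; exact lt_trans (hlt p (by simp) j hj) (hhd q hq)) hpw']
        simp [hout]
      · have h2 : p.1 - a ≥ 2 := by omega
        rw [if_neg h1, if_pos h2]
        have := ih (o ++ [a] ++ [p.1]) (by
          intro q hq j hj
          simp only [List.mem_append, List.mem_singleton] at hj
          rcases hj with hj | hj
          · exact lt_trans (hlt p (by simp) j (by simpa using hj)) (hhd q hq)
          · subst hj; exact hhd q hq) hpw'
        rw [this]
        simp

-- ===== VERDICT (by name: the statement is the Claim_ definition above) =====
theorem new_search_char_spec : Claim_equal_new_search_char := by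
  intro s char _
  unfold Spec_new_search_char new_search_char new_search_char_alt
  rw [pv_foldl_guard (pvHit char) pvStepB]
  set lp := (PySem.List.enumerate s.toList).filter (pvHit char) with hlp
  have hpw : lp.Pairwise (fun p q => p.1 < q.1) :=
    (PySem.List.pairwise_lt_enumerate s.toList 0).filter _
  have := pv_core lp [] (by intro p _ j hj; simp at hj) hpw
  simpa [List.foldl_map] using this
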